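-- pv_equiv track=rewrite | github.com/sueszli/vector-database-benchmark | dataset/python-mutated/composite_names_in_control_flow_test.py | while_basic_dict
-- ===== SOURCE A (Python) =====
-- def while_basic_dict(x, a, b):
--     if False:
--         while True:
--             i = 10
--     y = {'a': a, 'b': b}
--     while x > 0:
--         x -= 1
--         y['a'] += 1
--     return y
-- ===== SOURCE B (Python) =====
-- def while_basic_dict(x, a, b):
--     # closed form: the loop runs max(x, 0) times, adding 1 to y['a'] each time
--     return {'a': a + max(x, 0), 'b': b}
-- ===== Notes on version B (the rewrite author's own statement) =====
-- stated objective: faster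
-- what changed: Replaces the x-iteration decrement loop with the closed-form dict {'a': a + max(x, 0), 'b': b}.
import Mathlib
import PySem

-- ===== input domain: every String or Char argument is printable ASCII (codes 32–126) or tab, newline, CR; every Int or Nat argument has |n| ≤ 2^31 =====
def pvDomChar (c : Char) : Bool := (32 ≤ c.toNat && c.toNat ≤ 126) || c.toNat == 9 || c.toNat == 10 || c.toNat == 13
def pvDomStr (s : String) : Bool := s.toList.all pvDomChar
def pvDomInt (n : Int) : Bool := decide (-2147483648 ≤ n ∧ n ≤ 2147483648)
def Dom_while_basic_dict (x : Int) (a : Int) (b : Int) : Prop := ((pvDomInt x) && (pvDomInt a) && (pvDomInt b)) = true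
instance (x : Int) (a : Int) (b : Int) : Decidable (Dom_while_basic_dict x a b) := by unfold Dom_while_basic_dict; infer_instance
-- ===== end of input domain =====

-- B replaces A's x-iteration increment loop with the closed form a + max(x, 0) (asymptotically faster).

-- ===== PORT A =====
-- the 'while x > 0: x -= 1; y['a'] += 1' loop (y['a'] exists, so += is modify with any default)
def whileBasicDictLoop (x : Int) (y : PySem.Dict String Int) : PySem.Dict String Int :=
  if x > 0 then whileBasicDictLoop (x - 1) (y.modify "a" 0 (· + 1)) else y
termination_by x.toNat
decreasing_by omega

def while_basic_dict (x : Int) (a : Int) (b : Int) : List (String × Int) :=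
  (whileBasicDictLoop x (PySem.Dict.ofList [("a", a), ("b", b)])).items

-- ===== PORT B =====
def while_basic_dict_alt (x : Int) (a : Int) (b : Int) : List (String × Int) :=
  [("a", a + max x 0), ("b", b)]

-- ===== PRECONDITION & SPEC =====
def Spec_while_basic_dict (x : Int) (a : Int) (b : Int) (out : List (String × Int)) : Prop := out = while_basic_dict_alt x a b
instance (x : Int) (a : Int) (b : Int) (out : List (String × Int)) : Decidable (Spec_while_basic_dict x a b out) := by unfold Spec_while_basic_dict; infer_instance

-- ===== CLAIM (what is proved, stated in full; the proofs are below) =====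
def Claim_equal_while_basic_dict : Prop := ∀ (x : Int) (a : Int) (b : Int), Dom_while_basic_dict x a b → Spec_while_basic_dict x a b (while_basic_dict x a b)

-- ===== LEMMAS AND PROOFS =====
lemma whileBasicDictLoop_eq (x : Int) (v b : Int) :
    whileBasicDictLoop x (PySem.Dict.mk [("a", v), ("b", b)]) =
      PySem.Dict.mk [("a", v + max x 0), ("b", b)] := by
  by_cases h : x > 0
  · have hx : (x - 1).toNat < x.toNat := by omega
    rw [whileBasicDictLoop, if_pos h]
    have hm : (PySem.Dict.mk [("a", v), ("b", b)] : PySem.Dict String Int).modify "a" 0 (· + 1)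
        = PySem.Dict.mk [("a", v + 1), ("b", b)] := by
      simp [PySem.Dict.modify, PySem.Dict.insert, PySem.Dict.getD, PySem.Dict.get?,
            PySem.Dict.contains]
    rw [hm, whileBasicDictLoop_eq (x - 1) (v + 1) b]
    have : v + 1 + max (x - 1) 0 = v + max x 0 := by omega
    rw [this]
  · rw [whileBasicDictLoop, if_neg h]
    have : max x 0 = 0 := by omega
    simp [this]
termination_by x.toNat
decreasing_by omega

-- ===== VERDICT (by name: the statement is the Claim_ definition above) =====
theorem while_basic_dict_spec : Claim_equal_while_basic_dict := by
  intro x a b _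
  unfold Spec_while_basic_dict while_basic_dict while_basic_dict_alt
  have h : (PySem.Dict.ofList [("a", a), ("b", b)] : PySem.Dict String Int)
      = PySem.Dict.mk [("a", a), ("b", b)] := by
    simp [PySem.Dict.ofList, PySem.Dict.update, PySem.Dict.insert, PySem.Dict.empty,
          PySem.Dict.contains]
  rw [h, whileBasicDictLoop_eq]
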